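-- pv_equiv track=rewrite | github.com/B208-MOD/Tools | 1.py | process_input_numbers
-- ===== SOURCE A (Python) =====
-- def process_input_numbers(numbers):
--     results = []
--
--     for number in numbers:
--         number_str = str(number)
--
--         if len(number_str) == 5:
--             results.append(number - 1)
--         elif len(number_str) == 4:
--             results.append(int(number_str[:-1] + "0" + number_str[-1]) - 1)
--         else:
--             return None
--
--     return results
-- ===== SOURCE B (Python) =====
-- def _transform(number):
--     number_str = str(number)
--     if len(number_str) == 5:
--         return number - 1
--     return int(number_str[:-1] + "0" + number_str[-1]) - 1
--
--
-- def process_input_numbers(numbers):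
--     if any(len(str(n)) not in (4, 5) for n in numbers):
--         return None
--     return [_transform(n) for n in numbers]
-- ===== Notes on version B (the rewrite author's own statement) =====
-- stated objective: simpler
-- what changed: Replaced A's single fused loop with early return and an explicit accumulator by two passes: an any() validation pass over string lengths, then a list-comprehension map applying the same per-number transform.
import Mathlib
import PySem

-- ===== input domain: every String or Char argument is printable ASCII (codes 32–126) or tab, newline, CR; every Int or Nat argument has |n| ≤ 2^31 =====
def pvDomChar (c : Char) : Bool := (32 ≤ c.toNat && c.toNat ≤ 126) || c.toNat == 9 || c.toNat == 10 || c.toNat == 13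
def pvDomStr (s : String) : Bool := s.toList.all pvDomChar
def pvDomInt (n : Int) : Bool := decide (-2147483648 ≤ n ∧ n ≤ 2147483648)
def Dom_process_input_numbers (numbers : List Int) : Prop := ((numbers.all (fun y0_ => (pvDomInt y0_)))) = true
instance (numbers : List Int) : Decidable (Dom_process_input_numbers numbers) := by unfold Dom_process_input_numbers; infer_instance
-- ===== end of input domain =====

-- B changes A's fused early-returning loop into two passes (a validation pass, then a map); return value unchanged.

-- ===== PORT A =====
-- the 4-digit branch: int(number_str[:-1] + "0" + number_str[-1]) - 1
-- str(n) is a nonempty digit string, so s[-1] and int(...) always succeed; the .getD defaults are never used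
def pvInsertZero (n : Int) : Int :=
  let s := PySem.Int.toChars n
  ((PySem.Int.ofChars? (PySem.List.slice s none (some (-1)) ++ ['0'] ++
      [(PySem.List.pyGet? s (-1)).getD ' '])).getD 0) - 1

-- the for-loop with its `results` accumulator and early `return None`
def pvGoA : List Int → List Int → Option (List Int)
  | [], results => some results
  | n :: rest, results =>
    let s := PySem.Int.toChars n
    if s.length = 5 then pvGoA rest (results ++ [n - 1])
    else if s.length = 4 then pvGoA rest (results ++ [pvInsertZero n])
    else none

def process_input_numbers (numbers : List Int) : Option (List Int) :=
  pvGoA numbers []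

-- ===== PORT B =====
def pvTransform (number : Int) : Int :=
  let s := PySem.Int.toChars number
  if s.length = 5 then number - 1
  else ((PySem.Int.ofChars? (PySem.List.slice s none (some (-1)) ++ ['0'] ++
      [(PySem.List.pyGet? s (-1)).getD ' '])).getD 0) - 1

def process_input_numbers_alt (numbers : List Int) : Option (List Int) :=
  if numbers.any (fun n => !((PySem.Int.toChars n).length == 4 || (PySem.Int.toChars n).length == 5))
  then none
  else some (numbers.map pvTransform)

-- ===== PRECONDITION & SPEC =====
def Spec_process_input_numbers (numbers : List Int) (out : Option (List Int)) : Prop := out = process_input_numbers_alt numbers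
instance (numbers : List Int) (out : Option (List Int)) : Decidable (Spec_process_input_numbers numbers out) := by unfold Spec_process_input_numbers; infer_instance

-- ===== CLAIM (what is proved, stated in full; the proofs are below) =====
def Claim_equal_process_input_numbers : Prop := ∀ (numbers : List Int), Dom_process_input_numbers numbers → Spec_process_input_numbers numbers (process_input_numbers numbers)

-- ===== LEMMAS AND PROOFS =====

lemma pvGoA_eq (nums : List Int) : ∀ acc : List Int,
    pvGoA nums acc =
      if nums.any (fun n => !((PySem.Int.toChars n).length == 4 || (PySem.Int.toChars n).length == 5))
      then none
      else some (acc ++ nums.map pvTransform) := by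
  induction nums with
  | nil => intro acc; simp [pvGoA]
  | cons n rest ih =>
    intro acc
    simp only [pvGoA, List.any_cons, List.map_cons]
    by_cases h5 : (PySem.Int.toChars n).length = 5
    · rw [if_pos h5, ih]
      simp [h5, pvTransform]
    · by_cases h4 : (PySem.Int.toChars n).length = 4
      · rw [if_neg h5, if_pos h4, ih]
        simp only [pvTransform, pvInsertZero, if_neg h5]
        simp [h4, h5]
      · rw [if_neg h5, if_neg h4]
        simp [h4, h5]

-- ===== VERDICT (by name: the statement is the Claim_ definition above) =====
theorem process_input_numbers_spec : Claim_equal_process_input_numbers := by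
  intro numbers _
  unfold Spec_process_input_numbers process_input_numbers process_input_numbers_alt
  rw [pvGoA_eq]
  simp
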